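-- pv_equiv track=rewrite | github.com/SalernoNicola/Character-Recognition-using-CNN | Character_Recognition_using_CNN/conv_2_tfrecord/pconv/tfr_converter.py | __split_ds
-- ===== SOURCE A (Python) =====
-- def __split_ds(ds, split):
--     ds_split = []
--     ds_size = len(ds)
--     batch_size = ds_size // split
--     remainder = ds_size % split
--     acc = 0
--
--     for i in range(split):
--         chunk_size = batch_size + 1 if (i < remainder) else batch_size
--         ds_split.append(ds[acc: acc + chunk_size])
--         acc += chunk_size
--
--     return ds_split
-- ===== SOURCE B (Python) =====
-- def __split_ds(ds, split):
--     batch = len(ds) // split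
--     rem = len(ds) % split
--     start = lambda i: i * batch + min(i, rem)
--     return [ds[start(i):start(i + 1)] for i in range(split)]
-- ===== Notes on version B (the rewrite author's own statement) =====
-- stated objective: alternative
-- what changed: Replaces the running accumulator and conditional chunk-size with the closed-form boundary start(i) = i*batch + min(i, rem); each chunk is ds[start(i):start(i+1)] in a comprehension.
import Mathlib
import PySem

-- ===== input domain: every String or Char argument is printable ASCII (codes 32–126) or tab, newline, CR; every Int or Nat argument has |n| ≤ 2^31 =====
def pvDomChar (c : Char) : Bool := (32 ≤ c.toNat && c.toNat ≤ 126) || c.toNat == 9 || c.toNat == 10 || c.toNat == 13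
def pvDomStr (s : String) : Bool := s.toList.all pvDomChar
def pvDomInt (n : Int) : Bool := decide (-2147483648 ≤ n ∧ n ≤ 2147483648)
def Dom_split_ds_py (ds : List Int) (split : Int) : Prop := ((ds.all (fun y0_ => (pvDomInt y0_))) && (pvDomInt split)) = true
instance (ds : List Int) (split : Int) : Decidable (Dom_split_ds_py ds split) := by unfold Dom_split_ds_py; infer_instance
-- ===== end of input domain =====

-- B replaces A's running accumulator and conditional chunk size by the closed-form
-- chunk boundary start(i) = i*batch + min(i, rem); alternative decomposition, same cost.


-- ===== PORT A =====
def split_ds_py (ds : List Int) (split : Int) : List (List Int) :=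
  ((PySem.List.pyRange 0 split 1).foldl
      (fun (st : List (List Int) × Int) i =>
        (st.1 ++ [PySem.List.slice ds (some st.2) (some (st.2 + (if i < PySem.Int.mod (ds.length : Int) split then PySem.Int.floordiv (ds.length : Int) split + 1 else PySem.Int.floordiv (ds.length : Int) split)))],
         st.2 + (if i < PySem.Int.mod (ds.length : Int) split then PySem.Int.floordiv (ds.length : Int) split + 1 else PySem.Int.floordiv (ds.length : Int) split)))
      ([], 0)).1

-- ===== PORT B =====
-- closed-form start index of chunk i
def pvStart (batch rem i : Int) : Int := i * batch + min i rem

def split_ds_py_alt (ds : List Int) (split : Int) : List (List Int) :=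
  (PySem.List.pyRange 0 split 1).map
    (fun i => PySem.List.slice ds
      (some (pvStart (PySem.Int.floordiv (ds.length : Int) split) (PySem.Int.mod (ds.length : Int) split) i))
      (some (pvStart (PySem.Int.floordiv (ds.length : Int) split) (PySem.Int.mod (ds.length : Int) split) (i + 1))))

-- ===== PRECONDITION & SPEC =====
-- Pre_ excludes only split = 0, on which Python's '//' raises ZeroDivisionError.
def Pre_split_ds_py (ds : List Int) (split : Int) : Prop := split ≠ 0
instance (ds : List Int) (split : Int) : Decidable (Pre_split_ds_py ds split) := by unfold Pre_split_ds_py; infer_instance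
def pvWitness_split_ds_py : List Int × Int := ([1, 2, 3, 4, 5], 2)

def Spec_split_ds_py (ds : List Int) (split : Int) (out : List (List Int)) : Prop := out = split_ds_py_alt ds split
instance (ds : List Int) (split : Int) (out : List (List Int)) : Decidable (Spec_split_ds_py ds split out) := by unfold Spec_split_ds_py; infer_instance

-- ===== CLAIM (what is proved, stated in full; the proofs are below) =====
def Claim_equal_split_ds_py : Prop := ∀ (ds : List Int) (split : Int), Dom_split_ds_py ds split → Pre_split_ds_py ds split → Spec_split_ds_py ds split (split_ds_py ds split)

-- ===== LEMMAS AND PROOFS =====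

lemma fold_eq_closed (ds : List Int) (batch rem : Int) (hrem : 0 ≤ rem) (m : Nat) :
    (PySem.List.pyRange 0 (m : Int) 1).foldl
      (fun (st : List (List Int) × Int) i =>
        (st.1 ++ [PySem.List.slice ds (some st.2) (some (st.2 + (if i < rem then batch + 1 else batch)))],
         st.2 + (if i < rem then batch + 1 else batch)))
      ([], 0)
    = ((PySem.List.pyRange 0 (m : Int) 1).map
        (fun i => PySem.List.slice ds (some (pvStart batch rem i)) (some (pvStart batch rem (i + 1)))),
       pvStart batch rem m) := by
  induction m with
  | zero =>
      simp [PySem.List.pyRange_one_eq_nil (by omega : (0:Int) ≤ 0), pvStart]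
      omega
  | succ m ih =>
      have hcast : ((m + 1 : Nat) : Int) = (m : Int) + 1 := by push_cast; ring
      rw [hcast, PySem.List.pyRange_one_succ_right (by positivity), List.foldl_append, List.map_append, ih]
      simp only [List.foldl_cons, List.foldl_nil, List.map_cons, List.map_nil]
      have hstep : pvStart batch rem (m : Int) + (if (m : Int) < rem then batch + 1 else batch)
          = pvStart batch rem ((m : Int) + 1) := by
        have hb : ((m : Int) + 1) * batch = (m : Int) * batch + batch := by ring
        simp only [pvStart, hb]; split_ifs with h <;> omega
      rw [hstep]

theorem split_ds_py_spec : Claim_equal_split_ds_py := by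
  intro ds split _ hpre
  unfold Pre_split_ds_py at hpre
  unfold Spec_split_ds_py split_ds_py split_ds_py_alt
  by_cases hpos : 0 < split
  · have hrem : 0 ≤ PySem.Int.mod (ds.length : Int) split := by
      rw [PySem.Int.mod_eq_emod_of_pos hpos]
      exact Int.emod_nonneg _ (by omega)
    have hm : split = ((split.toNat : Nat) : Int) := by omega
    rw [hm]
    rw [fold_eq_closed ds (PySem.Int.floordiv (ds.length : Int) (split.toNat : Int)) (PySem.Int.mod (ds.length : Int) (split.toNat : Int)) (hm ▸ hrem) split.toNat]
  · have : split < 0 := by omega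
    rw [PySem.List.pyRange_one_eq_nil (by omega : split ≤ 0)]
    simp
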